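-- pv_equiv track=rewrite | github.com/sagemath/sage-archive-2023-02-01 | src/sage/combinat/fast_vector_partitions.py | recursive_within_from_to
-- ===== SOURCE A (Python) =====
-- def recursive_within_from_to(m, s, e, useS, useE):
--     r"""
--     Internal part of the current implementation of fast_vector_partitions().
--
--     INPUT:
--             - ``m``, ``s``, ``e`` -- Three lists, understood as vectors.
--             - ``useS``, ``useE``  -- Two logical flags.
--
--     OUTPUT:
--             Lexicographically ordered list of lists ``v`` satisfying
--
--             ``e <= v <= s`` and ``v <|= m`` as vectors.
--
--     WARNING:
--             The first call must be with ``useS==useE==True`` and ``s <|= m``.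
--
--     NOTE:
--             The flags ``useS`` and ``useE`` are used to implement the condition
--             efficiently. Because testing it loops over the vector, re-testing
--             for each step as the vector grows is inefficient: all but the last
--             comparison have been done cumulatively already. This code tests
--             only for the last one, using the flags to accumulate information
--             from previous calls.
--     """
--     if useS:
--         start = s[0]
--     else:
--         start = m[0]
--
--     if useE:
--         end = e[0]
--     else:
--         end = 0
--     result = []
--
--     for x in range(start, end - 1, -1):
--         useSS = useS and x == s[0]
--         useEE = useE and x == e[0]
--         if len(m) > 1:
--             out = recursive_within_from_to(m[1:], s[1:], e[1:], useSS, useEE)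
--             for o in out:
--                 result += [[x] + o]
--         else:
--             result += [[x]] # we know the answer for singletons
--
--     return result
-- ===== SOURCE B (Python) =====
-- def recursive_within_from_to(m, s, e, useS, useE):
--     # Re-implementation as demand-driven dynamic programming: one recursive pass
--     # over the suffix chain computes, per level, a table holding the complete
--     # answer for every flag combination actually demanded by the level above,
--     # so each (suffix, flags) subproblem is enumerated once and shared.
--     def add_key(ks, k):
--         if k not in ks:
--             ks.append(k)
--         return ks
--
--     def child_keys(mm, ss, ee, keys):
--         ks = []
--         for uS, uE in keys:
--             start = ss[0] if uS else mm[0]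
--             end = ee[0] if uE else 0
--             if start < end:
--                 continue
--             if uS and uE and ss[0] == ee[0]:
--                 add_key(ks, (True, True))
--             if uS and (not uE or ee[0] != ss[0]):
--                 add_key(ks, (True, False))
--             if uE and (not uS or ss[0] != ee[0]):
--                 add_key(ks, (False, True))
--             used = (1 if uS else 0) + (1 if uE and (not uS or ee[0] != ss[0]) else 0)
--             if used < start - end + 1:
--                 add_key(ks, (False, False))
--         return ks
--
--     def levels(mm, ss, ee, keys):
--         if len(mm) > 1:
--             sub = levels(mm[1:], ss[1:], ee[1:], child_keys(mm, ss, ee, keys))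
--         else:
--             sub = None
--         out = {}
--         for uS, uE in keys:
--             start = ss[0] if uS else mm[0]
--             end = ee[0] if uE else 0
--             rows = []
--             for x in range(start, end - 1, -1):
--                 if sub is None:
--                     rows.append([x])
--                 else:
--                     rows.extend([x] + o for o in sub[(uS and x == ss[0], uE and x == ee[0])])
--             out[(uS, uE)] = rows
--         return out
--
--     return levels(m, s, e, [(useS, useE)])[(useS, useE)] if m else []
-- ===== Notes on version B (the rewrite author's own statement) =====
-- stated objective: alternative
-- what changed: A enumerates by naive top-down recursion, one recursive call per loop value; B makes a single bottom-up pass over the suffix chain, computing at each level a table of the complete answer for every still-reachable flag combination and assembling parents by table lookup.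
-- intended difference: On empty m (inside Pre_ only reachable with useS set) whose top range is nonempty, A returns 1-component vectors [[x],...] although a 0-dimensional request can have no 1-component answers (an artefact of its len(m)>1 guard); B returns the natural []. — e.g. on recursive_within_from_to([], [2], [], true, false): A returns [[2], [1], [0]], B returns []
-- outside the precondition, e.g. on recursive_within_from_to([2, 1], [-1], [], True, False): A returns [], B returns []; on recursive_within_from_to([2, 1], [], [5], False, True): A returns [], B returns []
import Mathlib
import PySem

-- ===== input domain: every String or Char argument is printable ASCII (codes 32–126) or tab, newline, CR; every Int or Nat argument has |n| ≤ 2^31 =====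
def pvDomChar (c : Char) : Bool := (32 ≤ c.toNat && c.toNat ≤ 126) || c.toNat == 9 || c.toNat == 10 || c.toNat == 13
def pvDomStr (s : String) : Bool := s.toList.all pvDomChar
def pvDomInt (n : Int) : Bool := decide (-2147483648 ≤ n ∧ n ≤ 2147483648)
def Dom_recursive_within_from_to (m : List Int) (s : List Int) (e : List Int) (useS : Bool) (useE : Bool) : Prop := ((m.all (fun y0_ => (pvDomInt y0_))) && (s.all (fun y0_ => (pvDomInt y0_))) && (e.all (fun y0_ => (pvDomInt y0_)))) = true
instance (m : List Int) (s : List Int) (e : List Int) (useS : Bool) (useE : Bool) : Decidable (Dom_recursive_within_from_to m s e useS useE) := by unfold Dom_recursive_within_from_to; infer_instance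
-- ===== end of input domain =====

-- B replaces A's per-value recursion by one bottom-up pass over the suffix chain that
-- computes a table of results for every still-reachable flag combination (objective: alternative).

-- ===== PORT A =====
mutual
def recursive_within_from_to (m : List Int) (s : List Int) (e : List Int) (useS : Bool) (useE : Bool) : List (List Int) :=
  let start : Int := if useS then PySem.List.pyGetD s 0 0 else PySem.List.pyGetD m 0 0
  let stop : Int := if useE then PySem.List.pyGetD e 0 0 else 0
  rwftLoop m s e useS useE (PySem.List.pyRange start (stop - 1) (-1)) []
termination_by (m.length, 1, 0)

def rwftLoop (m : List Int) (s : List Int) (e : List Int) (useS : Bool) (useE : Bool) (xs : List Int) (result : List (List Int)) : List (List Int) :=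
  match xs with
  | [] => result
  | x :: rest =>
    let useSS := useS && decide (x = PySem.List.pyGetD s 0 0)
    let useEE := useE && decide (x = PySem.List.pyGetD e 0 0)
    let result' :=
      if 1 < m.length then
        result ++ (recursive_within_from_to m.tail s.tail e.tail useSS useEE).map (fun o => x :: o)
      else
        result ++ [[x]]
    rwftLoop m s e useS useE rest result'
termination_by (m.length, 0, xs.length)
decreasing_by
  all_goals simp_wf
  all_goals first
    | (apply Prod.Lex.left; omega)
    | (apply Prod.Lex.right; first | (apply Prod.Lex.left; omega) | (apply Prod.Lex.right; omega))
end

-- ===== PORT B =====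
-- add_key of Source B
def rwftAddKey (ks : List (Bool × Bool)) (k : Bool × Bool) : List (Bool × Bool) :=
  if k ∈ ks then ks else ks ++ [k]

-- body of the 'for uS, uE in keys' loop of child_keys in Source B
def rwftKeyStep (mm : List Int) (ss : List Int) (ee : List Int) (ks : List (Bool × Bool)) (k : Bool × Bool) : List (Bool × Bool) :=
  let uS := k.1
  let uE := k.2
  let start : Int := if uS then PySem.List.pyGetD ss 0 0 else PySem.List.pyGetD mm 0 0
  let stop : Int := if uE then PySem.List.pyGetD ee 0 0 else 0
  if start < stop then ks
  else
    let ks := if uS && uE && decide (PySem.List.pyGetD ss 0 0 = PySem.List.pyGetD ee 0 0) then rwftAddKey ks (true, true) else ks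
    let ks := if uS && (!uE || decide (PySem.List.pyGetD ee 0 0 ≠ PySem.List.pyGetD ss 0 0)) then rwftAddKey ks (true, false) else ks
    let ks := if uE && (!uS || decide (PySem.List.pyGetD ss 0 0 ≠ PySem.List.pyGetD ee 0 0)) then rwftAddKey ks (false, true) else ks
    let used : Int := (if uS then 1 else 0) + (if uE && (!uS || decide (PySem.List.pyGetD ee 0 0 ≠ PySem.List.pyGetD ss 0 0)) then 1 else 0)
    if used < start - stop + 1 then rwftAddKey ks (false, false) else ks

-- child_keys of Source B: the flag combinations the level below is asked for
def rwftChildKeys (mm : List Int) (ss : List Int) (ee : List Int) (keys : List (Bool × Bool)) : List (Bool × Bool) :=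
  keys.foldl (rwftKeyStep mm ss ee) []

-- inner 'rows' loop of levels() in Source B (sub = None ⇝ none)
def rwftRows (sub : Option (PySem.Dict (Bool × Bool) (List (List Int)))) (mm : List Int) (ss : List Int) (ee : List Int) (uS : Bool) (uE : Bool) : List (List Int) :=
  let start : Int := if uS then PySem.List.pyGetD ss 0 0 else PySem.List.pyGetD mm 0 0
  let stop : Int := if uE then PySem.List.pyGetD ee 0 0 else 0
  (PySem.List.pyRange start (stop - 1) (-1)).foldl (fun rows x =>
    match sub with
    | none => rows ++ [[x]]
    | some d => rows ++ (d.getD (uS && decide (x = PySem.List.pyGetD ss 0 0), uE && decide (x = PySem.List.pyGetD ee 0 0)) []).map (fun o => x :: o)) []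

-- levels() of Source B: the table of answers for one suffix, for the demanded flag combinations
def rwftLevels (mm : List Int) (ss : List Int) (ee : List Int) (keys : List (Bool × Bool)) : PySem.Dict (Bool × Bool) (List (List Int)) :=
  let sub : Option (PySem.Dict (Bool × Bool) (List (List Int))) :=
    if 1 < mm.length then some (rwftLevels mm.tail ss.tail ee.tail (rwftChildKeys mm ss ee keys)) else none
  keys.foldl (fun out k => out.insert k (rwftRows sub mm ss ee k.1 k.2)) PySem.Dict.empty
termination_by mm.length
decreasing_by simp; omega

def recursive_within_from_to_alt (m : List Int) (s : List Int) (e : List Int) (useS : Bool) (useE : Bool) : List (List Int) :=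
  if m = [] then [] else (rwftLevels m s e [(useS, useE)]).getD (useS, useE) []

-- ===== PRECONDITION & SPEC =====
-- Pre_ requires s (resp. e) to cover m's length whenever its flag is set, and m nonempty when
-- useS is off: on shorter s/e A generally raises IndexError mid-recursion; the rare ragged
-- inputs where A still returns (an empty top range, or a flag that drops before the shorter
-- list runs out) are excluded with it because agreement there is accidental, not specified.
def Pre_recursive_within_from_to (m : List Int) (s : List Int) (e : List Int) (useS : Bool) (useE : Bool) : Prop :=
  (useS = true → s ≠ [] ∧ m.length ≤ s.length) ∧
  (useS = false → m ≠ []) ∧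
  (useE = true → e ≠ [] ∧ m.length ≤ e.length)
instance (m : List Int) (s : List Int) (e : List Int) (useS : Bool) (useE : Bool) : Decidable (Pre_recursive_within_from_to m s e useS useE) := by unfold Pre_recursive_within_from_to; infer_instance
def pvWitness_recursive_within_from_to : List Int × List Int × List Int × Bool × Bool := ([1, 1], [1, 0], [0, 0], true, true)

-- On empty m (inside Pre_ only reachable with useS set) whose top range is nonempty, A returns
-- 1-component vectors [[x], …] although a 0-dimensional request can have no 1-component answers
-- (an artefact of its len(m)>1 guard); B returns the natural [].
def D_recursive_within_from_to (m : List Int) (s : List Int) (e : List Int) (useS : Bool) (useE : Bool) : Prop :=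
  m = [] ∧ useS = true ∧ s ≠ [] ∧
  (if useE = true then e ≠ [] ∧ e.getD 0 0 ≤ s.getD 0 0 else 0 ≤ s.getD 0 0)
instance (m : List Int) (s : List Int) (e : List Int) (useS : Bool) (useE : Bool) : Decidable (D_recursive_within_from_to m s e useS useE) := by unfold D_recursive_within_from_to; infer_instance

def Spec_recursive_within_from_to (m : List Int) (s : List Int) (e : List Int) (useS : Bool) (useE : Bool) (out : List (List Int)) : Prop := ¬ D_recursive_within_from_to m s e useS useE → out = recursive_within_from_to_alt m s e useS useE
instance (m : List Int) (s : List Int) (e : List Int) (useS : Bool) (useE : Bool) (out : List (List Int)) : Decidable (Spec_recursive_within_from_to m s e useS useE out) := by unfold Spec_recursive_within_from_to; infer_instance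

def pvDiffWitness_recursive_within_from_to : List Int × List Int × List Int × Bool × Bool := ([], [2], [], true, false)
def pvDiffWitnessOut_recursive_within_from_to : (List (List Int)) × (List (List Int)) := ([[2], [1], [0]], [])


-- ===== CLAIM (what is proved, stated in full; the proofs are below) =====
def Claim_unchanged_recursive_within_from_to : Prop := ∀ (m : List Int) (s : List Int) (e : List Int) (useS : Bool) (useE : Bool), Dom_recursive_within_from_to m s e useS useE → Pre_recursive_within_from_to m s e useS useE → Spec_recursive_within_from_to m s e useS useE (recursive_within_from_to m s e useS useE)
def Claim_changed_recursive_within_from_to : Prop := Dom_recursive_within_from_to (pvDiffWitness_recursive_within_from_to.1) (pvDiffWitness_recursive_within_from_to.2.1) (pvDiffWitness_recursive_within_from_to.2.2.1) (pvDiffWitness_recursive_within_from_to.2.2.2.1) (pvDiffWitness_recursive_within_from_to.2.2.2.2) ∧ Pre_recursive_within_from_to (pvDiffWitness_recursive_within_from_to.1) (pvDiffWitness_recursive_within_from_to.2.1) (pvDiffWitness_recursive_within_from_to.2.2.1) (pvDiffWitness_recursive_within_from_to.2.2.2.1) (pvDiffWitness_recursive_within_from_to.2.2.2.2) ∧ D_recursive_within_from_to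 (pvDiffWitness_recursive_within_from_to.1) (pvDiffWitness_recursive_within_from_to.2.1) (pvDiffWitness_recursive_within_from_to.2.2.1) (pvDiffWitness_recursive_within_from_to.2.2.2.1) (pvDiffWitness_recursive_within_from_to.2.2.2.2) ∧ recursive_within_from_to (pvDiffWitness_recursive_within_from_to.1) (pvDiffWitness_recursive_within_from_to.2.1) (pvDiffWitness_recursive_within_from_to.2.2.1) (pvDiffWitness_recursive_within_from_to.2.2.2.1) (pvDiffWitness_recursive_within_from_to.2.2.2.2) = pvDiffWitnessOut_recursive_within_from_to.1 ∧ recursive_within_from_to_alt (pvDiffWitness_recursive_within_from_to.1) (pvDiffWitness_recursive_within_from_to.2.1) (pvDiffWitness_recursive_within_from_to.2.2.1) (pvDiffWitness_recursive_within_from_to.2.2.2.1) (pvDiffWitness_recursive_within_from_to.2.2.2.2) = pvDiffWitnessOut_recursive_within_from_to.2 ∧ pvDiffWitnessOut_recursive_within_from_to.1 ≠ pvDiffWitnessOut_recursive_within_from_to.2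
def Claim_exact_recursive_within_from_to : Prop := ∀ (m : List Int) (s : List Int) (e : List Int) (useS : Bool) (useE : Bool), Dom_recursive_within_from_to m s e useS useE → Pre_recursive_within_from_to m s e useS useE → D_recursive_within_from_to m s e useS useE → recursive_within_from_to m s e useS useE ≠ recursive_within_from_to_alt m s e useS useE

-- ===== LEMMAS AND PROOFS =====

theorem rwftLoop_eq_flatMap (m s e : List Int) (uS uE : Bool) (xs : List Int) (r : List (List Int)) :
    rwftLoop m s e uS uE xs r = r ++ xs.flatMap (fun x =>
      if 1 < m.length then
        (recursive_within_from_to m.tail s.tail e.tail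
          (uS && decide (x = PySem.List.pyGetD s 0 0)) (uE && decide (x = PySem.List.pyGetD e 0 0))).map (fun o => x :: o)
      else [[x]]) := by
  induction xs generalizing r with
  | nil => simp [rwftLoop]
  | cons x rest ih =>
    rw [rwftLoop, ih]
    by_cases h : 1 < m.length <;> simp [h]

theorem mem_addKey_self (ks : List (Bool × Bool)) (k : Bool × Bool) : k ∈ rwftAddKey ks k := by
  unfold rwftAddKey; split <;> simp_all

theorem mem_addKey_of_mem (ks : List (Bool × Bool)) (k k' : Bool × Bool) (h : k' ∈ ks) :
    k' ∈ rwftAddKey ks k := by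
  unfold rwftAddKey; split <;> simp_all

theorem mem_ite_addKey (c : Prop) [Decidable c] (ks : List (Bool × Bool)) (k k' : Bool × Bool)
    (h : k' ∈ ks) : k' ∈ (if c then rwftAddKey ks k else ks) := by
  split
  · exact mem_addKey_of_mem _ _ _ h
  · exact h

theorem mem_ite_both (c : Prop) [Decidable c] (A B : List (Bool × Bool)) (k' : Bool × Bool)
    (hA : k' ∈ A) (hB : k' ∈ B) : k' ∈ (if c then A else B) := by
  split
  · exact hA
  · exact hB

theorem mem_keyStep_of_mem (mm ss ee : List Int) (ks : List (Bool × Bool)) (k k' : Bool × Bool)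
    (h : k' ∈ ks) : k' ∈ rwftKeyStep mm ss ee ks k := by
  simp only [rwftKeyStep]
  exact mem_ite_both _ _ _ _ h
    (mem_ite_addKey _ _ _ _ (mem_ite_addKey _ _ _ _ (mem_ite_addKey _ _ _ _ (mem_ite_addKey _ _ _ _ h))))

theorem childkey_mem_keyStep (mm ss ee : List Int) (ks : List (Bool × Bool)) (uS uE : Bool)
    (x : Int)
    (hx : x ∈ PySem.List.pyRange (if uS then PySem.List.pyGetD ss 0 0 else PySem.List.pyGetD mm 0 0)
      ((if uE then PySem.List.pyGetD ee 0 0 else 0) - 1) (-1)) :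
    (uS && decide (x = PySem.List.pyGetD ss 0 0), uE && decide (x = PySem.List.pyGetD ee 0 0)) ∈
      rwftKeyStep mm ss ee ks (uS, uE) := by
  rw [PySem.List.mem_pyRange_neg_one] at hx
  obtain ⟨hx1, hx2⟩ := hx
  cases uS <;> cases uE
  · -- uS = false, uE = false : child key is (false, false)
    simp only [Bool.false_eq_true, if_false] at hx1 hx2
    simp only [rwftKeyStep, Bool.false_and, Bool.false_eq_true, if_false]
    rw [if_neg (by omega), if_pos (by omega)]
    exact mem_addKey_self _ _
  · -- uS = false, uE = true : child key is (false, x == e0)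
    simp only [Bool.false_eq_true, if_false, if_true] at hx1 hx2
    by_cases hxe : x = PySem.List.pyGetD ee 0 0
    · simp only [rwftKeyStep, hxe, decide_true, Bool.false_and, Bool.and_true, 
        Bool.not_false, Bool.true_or, Bool.false_eq_true, if_false, if_true]
      rw [if_neg (by omega)]
      exact mem_ite_addKey _ _ _ _ (mem_addKey_self _ _)
    · simp only [rwftKeyStep, hxe, decide_false, Bool.false_and, Bool.and_false, Bool.true_and,
        Bool.not_false, Bool.true_or, Bool.false_eq_true, if_false, if_true]
      rw [if_neg (by omega), if_pos (by omega)]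
      exact mem_addKey_self _ _
  · -- uS = true, uE = false : child key is (x == s0, false)
    simp only [Bool.false_eq_true, if_false, if_true] at hx1 hx2
    by_cases hxs : x = PySem.List.pyGetD ss 0 0
    · simp only [rwftKeyStep, hxs, decide_true, Bool.and_true, Bool.and_false,
        Bool.false_and, Bool.not_false, Bool.true_or, Bool.false_eq_true, if_false, if_true]
      rw [if_neg (by omega)]
      exact mem_ite_addKey _ _ _ _ (mem_addKey_self _ _)
    · simp only [rwftKeyStep, hxs, decide_false, Bool.and_true, Bool.and_false,
        Bool.false_and, Bool.not_false, Bool.true_or, Bool.false_eq_true, if_false, if_true]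
      rw [if_neg (by omega), if_pos (by omega)]
      exact mem_addKey_self _ _
  · -- uS = true, uE = true : child key is (x == s0, x == e0)
    simp only [if_true] at hx1 hx2
    by_cases hxs : x = PySem.List.pyGetD ss 0 0 <;> by_cases hxe : x = PySem.List.pyGetD ee 0 0
    · have heq : PySem.List.pyGetD ss 0 0 = PySem.List.pyGetD ee 0 0 := by omega
      simp only [rwftKeyStep, hxs, heq, decide_true, Bool.and_self, 
        Bool.not_true, Bool.false_or, ne_eq, decide_not, Bool.not_true,
        Bool.and_false, Bool.false_eq_true, if_false, if_true]
      rw [if_neg (by omega)]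
      exact mem_ite_addKey _ _ _ _ (mem_addKey_self _ _)
    · have hne : PySem.List.pyGetD ss 0 0 ≠ PySem.List.pyGetD ee 0 0 := fun h => hxe (hxs.trans h)
      have hne' : PySem.List.pyGetD ee 0 0 ≠ PySem.List.pyGetD ss 0 0 := fun h => hne h.symm
      simp only [rwftKeyStep, hxs, hne, hne', decide_true, decide_false, ne_eq, decide_not,
        Bool.and_true, Bool.and_false, Bool.not_true, Bool.false_or, Bool.not_false,
        Bool.false_eq_true, if_false, if_true]
      rw [if_neg (by omega)]
      exact mem_ite_addKey _ _ _ _ (mem_addKey_of_mem _ _ _ (mem_addKey_self _ _))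
    · have hne : PySem.List.pyGetD ss 0 0 ≠ PySem.List.pyGetD ee 0 0 := fun h => hxs (hxe.trans h.symm)
      have hne' : PySem.List.pyGetD ee 0 0 ≠ PySem.List.pyGetD ss 0 0 := fun h => hne h.symm
      simp only [rwftKeyStep, hxe, hne, hne', decide_true, decide_false, ne_eq, decide_not,
        Bool.and_true, Bool.and_false, Bool.not_true, Bool.false_or, Bool.not_false,
        Bool.false_eq_true, if_false, if_true]
      rw [if_neg (by omega)]
      exact mem_ite_addKey _ _ _ _ (mem_addKey_self _ _)
    · have hne : PySem.List.pyGetD ee 0 0 ≠ PySem.List.pyGetD ss 0 0 := by omega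
      simp only [rwftKeyStep, hxs, hxe, hne, decide_false, ne_eq, decide_not,
        Bool.true_and, Bool.and_true, Bool.and_false, Bool.not_true, Bool.false_or, Bool.not_false,
        if_true]
      rw [if_neg (by omega), if_pos (by omega)]
      exact mem_addKey_self _ _

theorem mem_foldl_keyStep_of_mem (mm ss ee : List Int) (keys : List (Bool × Bool))
    (acc : List (Bool × Bool)) (k : Bool × Bool) (h : k ∈ acc) :
    k ∈ keys.foldl (rwftKeyStep mm ss ee) acc := by
  induction keys generalizing acc with
  | nil => exact h
  | cons k' rest ih => exact ih _ (mem_keyStep_of_mem mm ss ee acc k' k h)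

theorem childkey_mem_childKeys (mm ss ee : List Int) (keys : List (Bool × Bool)) (uS uE : Bool)
    (x : Int) (hmem : (uS, uE) ∈ keys)
    (hx : x ∈ PySem.List.pyRange (if uS then PySem.List.pyGetD ss 0 0 else PySem.List.pyGetD mm 0 0)
      ((if uE then PySem.List.pyGetD ee 0 0 else 0) - 1) (-1)) :
    (uS && decide (x = PySem.List.pyGetD ss 0 0), uE && decide (x = PySem.List.pyGetD ee 0 0)) ∈
      rwftChildKeys mm ss ee keys := by
  unfold rwftChildKeys
  have main : ∀ (rest : List (Bool × Bool)) (acc : List (Bool × Bool)), (uS, uE) ∈ rest →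
      (uS && decide (x = PySem.List.pyGetD ss 0 0), uE && decide (x = PySem.List.pyGetD ee 0 0)) ∈
        rest.foldl (rwftKeyStep mm ss ee) acc := by
    intro rest
    induction rest with
    | nil => intro _ h; cases h
    | cons k' rest ih =>
      intro acc h
      rcases List.mem_cons.mp h with h | h
      · exact mem_foldl_keyStep_of_mem mm ss ee rest _ _
          (h ▸ childkey_mem_keyStep mm ss ee acc uS uE x hx)
      · exact ih _ h
  exact main keys [] hmem

theorem getD_foldl_insert (f : (Bool × Bool) → List (List Int)) (keys : List (Bool × Bool))
    (d0 : PySem.Dict (Bool × Bool) (List (List Int))) (k : Bool × Bool) (dflt : List (List Int)) :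
    (keys.foldl (fun d k' => d.insert k' (f k')) d0).getD k dflt
      = if k ∈ keys then f k else d0.getD k dflt := by
  induction keys generalizing d0 with
  | nil => simp
  | cons k' rest ih =>
    rw [List.foldl_cons, ih, PySem.Dict.getD_insert]
    by_cases h1 : k ∈ rest <;> by_cases h2 : k = k' <;> simp [h1, h2]

theorem table_eq (mm ss ee : List Int) (keys : List (Bool × Bool)) (uS uE : Bool)
    (hmem : (uS, uE) ∈ keys) :
    (rwftLevels mm ss ee keys).getD (uS, uE) [] = recursive_within_from_to mm ss ee uS uE := by
  rw [rwftLevels]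
  rw [getD_foldl_insert (fun k => rwftRows _ mm ss ee k.1 k.2) keys PySem.Dict.empty (uS, uE) [],
    if_pos hmem]
  rw [recursive_within_from_to, rwftLoop_eq_flatMap, rwftRows]
  by_cases h : 1 < mm.length
  · simp only [if_pos h, List.nil_append, PySem.List.foldl_append_eq_flatMap]
    refine List.flatMap_congr fun x hx => ?_
    rw [table_eq mm.tail ss.tail ee.tail (rwftChildKeys mm ss ee keys)
        (uS && decide (x = PySem.List.pyGetD ss 0 0)) (uE && decide (x = PySem.List.pyGetD ee 0 0))
        (childkey_mem_childKeys mm ss ee keys uS uE x hmem hx)]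
  · simp only [if_neg h, List.nil_append, PySem.List.foldl_append_eq_flatMap]
termination_by mm.length
decreasing_by simp; omega

-- ===== VERDICT (by name: the statement is the Claim_ definition above) =====
theorem recursive_within_from_to_spec : Claim_unchanged_recursive_within_from_to := by
  intro m s e useS useE _ hpre hnd
  by_cases hm : m = []
  · subst hm
    have hS : useS = true := by
      cases useS
      · exact absurd rfl (hpre.2.1 rfl)
      · rfl
    subst hS
    have hs : s ≠ [] := (hpre.1 rfl).1
    rw [recursive_within_from_to_alt, if_pos rfl, recursive_within_from_to]
    simp only [PySem.List.pyGetD_zero, reduceIte]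
    cases useE
    · have hlt : s.getD 0 0 < 0 := by
        by_contra hge
        exact hnd ⟨rfl, rfl, hs, by simp only [Bool.false_eq_true, if_false]; omega⟩
      simp only [Bool.false_eq_true, if_false]
      rw [PySem.List.pyRange_neg_one_eq_nil (by omega), rwftLoop]
    · have he : e ≠ [] := (hpre.2.2 rfl).1
      have hlt : s.getD 0 0 < e.getD 0 0 := by
        by_contra hge
        exact hnd ⟨rfl, rfl, hs, by simp only [reduceIte]; exact ⟨he, by omega⟩⟩
      simp only [reduceIte]
      rw [PySem.List.pyRange_neg_one_eq_nil (by omega), rwftLoop]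
  · rw [recursive_within_from_to_alt, if_neg hm]
    exact (table_eq m s e [(useS, useE)] useS useE (List.mem_singleton.mpr rfl)).symm

theorem recursive_within_from_to_changed : Claim_changed_recursive_within_from_to := by
  unfold Claim_changed_recursive_within_from_to
  refine ⟨by decide, by decide, by decide, ?_, by decide, by decide⟩
  show recursive_within_from_to [] [2] [] true false = [[2], [1], [0]]
  rw [recursive_within_from_to, rwftLoop_eq_flatMap]
  decide

theorem recursive_within_from_to_tight : Claim_exact_recursive_within_from_to := by
  intro m s e useS useE _ _ hd
  obtain ⟨hm, hS, hs, hcond⟩ := hd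
  subst hm hS
  rw [recursive_within_from_to_alt, if_pos rfl, recursive_within_from_to, rwftLoop_eq_flatMap]
  simp only [PySem.List.pyGetD_zero, List.nil_append, reduceIte]
  have hcons : ∀ b : Int, b < s.getD 0 0 →
      PySem.List.pyRange (s.getD 0 0) b (-1) = s.getD 0 0 :: PySem.List.pyRange (s.getD 0 0 - 1) b (-1) :=
    fun b hb => PySem.List.pyRange_neg_one_cons hb
  cases useE
  · simp only [Bool.false_eq_true, if_false] at hcond ⊢
    rw [hcons (0 - 1) (by omega)]
    simp
  · simp only [reduceIte] at hcond ⊢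
    rw [hcons (e.getD 0 0 - 1) (by omega)]
    simp
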